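-- pv_equiv track=rewrite | github.com/ztmtoosm-project/ztmtoosm-schema | pazur.py | __linebrowser
-- ===== SOURCE A (Python) =====
-- def __linebrowser(hebelki_tuple_list_list):
--     mulist = []
--     for hebelki_tuple_list in hebelki_tuple_list_list:
--         last_hebelek = None
--         current_list = []
--         for i in range(0, len(hebelki_tuple_list)):
--             current_list.append((hebelki_tuple_list[i][0], hebelki_tuple_list[i][1]))
--             if hebelki_tuple_list[i][2] is not None:
--                 current_hebelek = hebelki_tuple_list[i][2]
--                 if last_hebelek is not None:
--                     mulist.append((last_hebelek, current_hebelek, current_list))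
--                 last_hebelek = current_hebelek
--                 current_list = [(hebelki_tuple_list[i][0], hebelki_tuple_list[i][1])]
--     return mulist
-- ===== SOURCE B (Python) =====
-- def __linebrowser(hebelki_tuple_list_list):
--     def segments(sub):
--         markers = [(i, t[2]) for i, t in enumerate(sub) if t[2] is not None]
--         return [(h1, h2, [(t[0], t[1]) for t in sub[i1:i2 + 1]])
--                 for (i1, h1), (i2, h2) in zip(markers, markers[1:])]
--     return [seg for sub in hebelki_tuple_list_list for seg in segments(sub)]
-- ===== Notes on version B (the rewrite author's own statement) =====
-- stated objective: alternative
-- what changed: B collects the marker positions of each sublist up front and then slices inclusive spans between consecutive markers, instead of maintaining and resetting a running accumulator with a last-marker state variable.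
import Mathlib
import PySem

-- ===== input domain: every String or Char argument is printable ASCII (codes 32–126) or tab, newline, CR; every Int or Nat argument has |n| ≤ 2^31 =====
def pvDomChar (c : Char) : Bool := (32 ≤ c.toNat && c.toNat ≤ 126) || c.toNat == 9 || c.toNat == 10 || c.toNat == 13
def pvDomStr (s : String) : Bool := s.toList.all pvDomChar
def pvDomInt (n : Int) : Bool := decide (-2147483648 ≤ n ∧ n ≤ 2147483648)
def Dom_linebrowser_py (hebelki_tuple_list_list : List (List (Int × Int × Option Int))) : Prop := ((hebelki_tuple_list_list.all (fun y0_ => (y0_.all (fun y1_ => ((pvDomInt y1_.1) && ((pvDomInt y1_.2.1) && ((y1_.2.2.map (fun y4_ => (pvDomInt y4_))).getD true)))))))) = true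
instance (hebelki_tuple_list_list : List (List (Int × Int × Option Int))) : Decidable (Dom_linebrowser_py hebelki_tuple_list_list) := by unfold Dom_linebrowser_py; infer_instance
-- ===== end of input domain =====

-- B collects marker positions first and slices spans between consecutive markers,
-- replacing A's running accumulator + last-marker state; objective: alternative decomposition, same cost.

-- ===== PORT A =====
-- inner loop body of A: state = (last_hebelek, current_list, mulist)
def lbStep (acc : Option Int × List (Int × Int) × List (Int × Int × List (Int × Int)))
    (t : Int × Int × Option Int) : Option Int × List (Int × Int) × List (Int × Int × List (Int × Int)) :=
  let cur := acc.2.1 ++ [(t.1, t.2.1)]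
  match t.2.2 with
  | none => (acc.1, cur, acc.2.2)
  | some h =>
      match acc.1 with
      | none => (some h, [(t.1, t.2.1)], acc.2.2)
      | some l => (some h, [(t.1, t.2.1)], acc.2.2 ++ [(l, h, cur)])

def linebrowser_py (hebelki_tuple_list_list : List (List (Int × Int × Option Int))) : List (Int × Int × (List (Int × Int))) :=
  hebelki_tuple_list_list.foldl (fun mu sub => (sub.foldl lbStep (none, [], mu)).2.2) []

-- ===== PORT B =====
-- markers: (index, hebelek) for every row whose third component is not None
def lbMarkers (sub : List (Int × Int × Option Int)) : List (Int × Int) :=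
  (PySem.List.enumerate sub 0).filterMap (fun p => p.2.2.2.map (fun h => (p.1, h)))

-- segments of one sublist: consecutive marker pairs, inclusive slice between them
def lbSegs (sub : List (Int × Int × Option Int)) : List (Int × Int × List (Int × Int)) :=
  ((lbMarkers sub).zip (lbMarkers sub).tail).map (fun q =>
    (q.1.2, q.2.2, (PySem.List.slice sub (some q.1.1) (some (q.2.1 + 1))).map (fun t => (t.1, t.2.1))))

def linebrowser_py_alt (hebelki_tuple_list_list : List (List (Int × Int × Option Int))) : List (Int × Int × (List (Int × Int))) :=
  hebelki_tuple_list_list.flatMap lbSegs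

-- ===== PRECONDITION & SPEC =====
def Spec_linebrowser_py (hebelki_tuple_list_list : List (List (Int × Int × Option Int))) (out : List (Int × Int × (List (Int × Int)))) : Prop := out = linebrowser_py_alt hebelki_tuple_list_list
instance (hebelki_tuple_list_list : List (List (Int × Int × Option Int))) (out : List (Int × Int × (List (Int × Int)))) : Decidable (Spec_linebrowser_py hebelki_tuple_list_list out) := by unfold Spec_linebrowser_py; infer_instance

-- ===== CLAIM (what is proved, stated in full; the proofs are below) =====
def Claim_equal_linebrowser_py : Prop := ∀ (hebelki_tuple_list_list : List (List (Int × Int × Option Int))), Dom_linebrowser_py hebelki_tuple_list_list → Spec_linebrowser_py hebelki_tuple_list_list (linebrowser_py hebelki_tuple_list_list)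

-- ===== LEMMAS AND PROOFS =====

-- reference recursion: segments after a marker l with accumulated pairs cur
def segsFrom (l : Int) (cur : List (Int × Int)) : List (Int × Int × Option Int) → List (Int × Int × List (Int × Int))
  | [] => []
  | t :: ts =>
    match t.2.2 with
    | none => segsFrom l (cur ++ [(t.1, t.2.1)]) ts
    | some h => (l, h, cur ++ [(t.1, t.2.1)]) :: segsFrom h [(t.1, t.2.1)] ts

-- reference recursion: before any marker has been seen
def segsNone : List (Int × Int × Option Int) → List (Int × Int × List (Int × Int))
  | [] => []
  | t :: ts =>
    match t.2.2 with
    | none => segsNone ts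
    | some h => segsFrom h [(t.1, t.2.1)] ts

-- index and value of the first marker
def firstMk : List (Int × Int × Option Int) → Option (Int × Int)
  | [] => none
  | t :: ts =>
    match t.2.2 with
    | some h => some (0, h)
    | none => (firstMk ts).map (fun p => (p.1 + 1, p.2))

-- generalized markers with arbitrary start index
def mAux (s : Int) (sub : List (Int × Int × Option Int)) : List (Int × Int) :=
  (PySem.List.enumerate sub s).filterMap (fun p => p.2.2.2.map (fun h => (p.1, h)))

theorem lbMarkers_eq (sub : List (Int × Int × Option Int)) : lbMarkers sub = mAux 0 sub := rfl

theorem mAux_cons (s : Int) (t : Int × Int × Option Int) (ts : List (Int × Int × Option Int)) :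
    mAux s (t :: ts) = (match t.2.2 with | none => [] | some h => [(s, h)]) ++ mAux (s + 1) ts := by
  cases ht : t.2.2 <;> simp [mAux, PySem.List.enumerate_cons, ht]

theorem mAux_shift (ts : List (Int × Int × Option Int)) : ∀ (s : Int),
    mAux s ts = (mAux 0 ts).map (fun p => (s + p.1, p.2)) := by
  induction ts with
  | nil => intro s; simp [mAux]
  | cons t ts ih =>
    intro s
    rw [mAux_cons, mAux_cons, ih (s + 1), ih (0 + 1), List.map_append, List.map_map]
    congr 1
    · cases h : t.2.2 <;> simp
    · refine List.map_congr_left (fun p _ => ?_)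
      simp [Prod.ext_iff]
      omega

theorem mAux_nonneg (ts : List (Int × Int × Option Int)) : ∀ (s : Int) (p : Int × Int),
    p ∈ mAux s ts → s ≤ p.1 := by
  induction ts with
  | nil => intro s p hp; simp [mAux] at hp
  | cons t ts ih =>
    intro s p hp
    rw [mAux_cons] at hp
    rcases List.mem_append.1 hp with h | h
    · cases ht : t.2.2 with
      | none => rw [ht] at h; simp at h
      | some v => rw [ht] at h; simp at h; simp [h]
    · have := ih (s + 1) p h; omega

theorem lbMarkers_nonneg (ts : List (Int × Int × Option Int)) (p : Int × Int)
    (hp : p ∈ lbMarkers ts) : 0 ≤ p.1 :=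
  mAux_nonneg ts 0 p ((lbMarkers_eq ts) ▸ hp)

theorem head?_mAux (ts : List (Int × Int × Option Int)) :
    (mAux 0 ts).head? = firstMk ts := by
  induction ts with
  | nil => simp [mAux, firstMk]
  | cons t ts ih =>
    rw [mAux_cons]
    cases ht : t.2.2 with
    | none =>
      have hr : firstMk (t :: ts) = (firstMk ts).map (fun p => (p.1 + 1, p.2)) := by
        simp [firstMk, ht]
      rw [List.nil_append, mAux_shift ts (0 + 1), hr, ← ih]
      cases mAux 0 ts with
      | nil => rfl
      | cons m M =>
        simp [Prod.ext_iff]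
        omega
    | some h => simp [firstMk, ht]

-- a cons-shift law for slices with nonnegative bounds
theorem slice_cons_shift (x : Int × Int × Option Int) (xs : List (Int × Int × Option Int))
    (a b : Int) (ha : 0 ≤ a) (hb : 0 ≤ b) :
    PySem.List.slice (x :: xs) (some (a + 1)) (some (b + 1)) = PySem.List.slice xs (some a) (some b) := by
  rw [PySem.List.slice_toNat _ (show (0:Int) ≤ a + 1 by omega) (show (0:Int) ≤ b + 1 by omega),
      PySem.List.slice_toNat _ ha hb]
  have h1 : (a + 1).toNat = a.toNat + 1 := by omega
  have h2 : (b + 1).toNat = b.toNat + 1 := by omega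
  rw [h1, h2, List.drop_succ_cons]
  congr 1
  omega

theorem zip_tail_map {α β : Type} (f : α → β) (l : List α) :
    ((l.map f).zip (l.map f).tail) = (l.zip l.tail).map (Prod.map f f) := by
  rw [← List.map_tail, List.zip_map]

theorem mem_zip_tail {α : Type} {l : List α} {p : α × α} (hp : p ∈ l.zip l.tail) :
    p.1 ∈ l ∧ p.2 ∈ l := by
  obtain ⟨h1, h2⟩ := List.of_mem_zip hp
  exact ⟨h1, List.mem_of_mem_tail h2⟩

-- the shifted tail of B's segment list for t :: ts equals B on ts
theorem shifted_segs (t : Int × Int × Option Int) (ts : List (Int × Int × Option Int)) :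
    ((((lbMarkers ts).map (fun p => (p.1 + 1, p.2))).zip (((lbMarkers ts).map (fun p => (p.1 + 1, p.2))).tail)).map
      (fun q => (q.1.2, q.2.2, (PySem.List.slice (t :: ts) (some q.1.1) (some (q.2.1 + 1))).map (fun r => (r.1, r.2.1)))))
    = lbSegs ts := by
  rw [zip_tail_map, List.map_map]
  unfold lbSegs
  refine List.map_congr_left (fun q hq => ?_)
  obtain ⟨h1, h2⟩ := mem_zip_tail hq
  have n1 := lbMarkers_nonneg ts q.1 h1
  have n2 := lbMarkers_nonneg ts q.2 h2
  obtain ⟨⟨a, ha⟩, ⟨b, hb⟩⟩ := q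
  have n1' : 0 ≤ a := n1
  have n2' : 0 ≤ b := n2
  show (ha, hb, (PySem.List.slice (t :: ts) (some (a + 1)) (some (b + 1 + 1))).map (fun r => (r.1, r.2.1)))
      = (ha, hb, (PySem.List.slice ts (some a) (some (b + 1))).map (fun r => (r.1, r.2.1)))
  rw [slice_cons_shift t ts a (b + 1) n1' (by omega)]

-- B skips a non-marker head row
theorem lbSegs_cons_none (t : Int × Int × Option Int) (ts : List (Int × Int × Option Int))
    (ht : t.2.2 = none) : lbSegs (t :: ts) = lbSegs ts := by
  have hm : lbMarkers (t :: ts) = (lbMarkers ts).map (fun p => (p.1 + 1, p.2)) := by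
    rw [lbMarkers_eq, lbMarkers_eq, mAux_cons, ht, mAux_shift ts (0 + 1), List.nil_append]
    refine List.map_congr_left (fun p _ => ?_)
    simp [Prod.ext_iff]
    omega
  unfold lbSegs
  rw [hm]
  exact shifted_segs t ts

-- B on a marker head row
theorem lbSegs_cons_some (t : Int × Int × Option Int) (ts : List (Int × Int × Option Int))
    (h : Int) (ht : t.2.2 = some h) :
    lbSegs (t :: ts) =
      match firstMk ts with
      | none => []
      | some kh => (h, kh.2, ((t :: ts).take (kh.1.toNat + 2)).map (fun r => (r.1, r.2.1))) :: lbSegs ts := by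
  have hm : lbMarkers (t :: ts) = (0, h) :: (lbMarkers ts).map (fun p => (p.1 + 1, p.2)) := by
    rw [lbMarkers_eq, lbMarkers_eq, mAux_cons, ht, mAux_shift ts (0 + 1)]
    simp only [List.cons_append, List.nil_append]
    congr 1
    refine List.map_congr_left (fun p _ => ?_)
    simp [Prod.ext_iff]
    omega
  conv_lhs => unfold lbSegs
  rw [hm]
  cases hM : lbMarkers ts with
  | nil =>
    have hf : firstMk ts = none := by rw [← head?_mAux, ← lbMarkers_eq, hM]; rfl
    simp [hf]
  | cons m1 M' =>
    have hf : firstMk ts = some m1 := by rw [← head?_mAux, ← lbMarkers_eq, hM]; rfl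
    have hn1 : 0 ≤ m1.1 := lbMarkers_nonneg ts m1 (hM ▸ List.mem_cons_self ..)
    have hs := shifted_segs t ts
    rw [hM] at hs
    simp only [List.map_cons, List.tail_cons] at hs
    rw [hf]
    simp only [List.map_cons, List.tail_cons, List.zip_cons_cons, List.map_cons]
    rw [hs]
    congr 1
    simp only [PySem.List.slice_zero_start]
    rw [PySem.List.slice_to _ (by omega)]
    have h2 : (m1.1 + 1 + 1).toNat = m1.1.toNat + 2 := by omega
    rw [h2]

-- characterization of segsFrom via the first marker of the remainder
theorem firstMk_nonneg (ts : List (Int × Int × Option Int)) (p : Int × Int)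
    (hp : firstMk ts = some p) : 0 ≤ p.1 := by
  rw [← head?_mAux] at hp
  exact mAux_nonneg ts 0 p (List.mem_of_mem_head? hp)

theorem segsFrom_eq (ts : List (Int × Int × Option Int)) : ∀ (cur : List (Int × Int)) (h : Int),
    segsFrom h cur ts =
      match firstMk ts with
      | none => []
      | some kh => (h, kh.2, cur ++ (ts.take (kh.1.toNat + 1)).map (fun r => (r.1, r.2.1))) :: segsNone ts := by
  induction ts with
  | nil => intro cur h; simp [segsFrom, firstMk]
  | cons t ts ih =>
    intro cur h
    cases ht : t.2.2 with
    | none =>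
      simp only [segsFrom, ht]
      rw [ih (cur ++ [(t.1, t.2.1)]) h]
      simp only [firstMk, ht, segsNone]
      cases hf : firstMk ts with
      | none => simp
      | some kh =>
        have hk : 0 ≤ kh.1 := firstMk_nonneg ts kh hf
        have h2 : (kh.1 + 1).toNat + 1 = (kh.1.toNat + 1) + 1 := by omega
        simp [h2, List.take_succ_cons]
    | some h2 =>
      simp [segsFrom, segsNone, firstMk, ht]

-- B computes the reference recursion
theorem lbSegs_eq_segsNone (sub : List (Int × Int × Option Int)) : lbSegs sub = segsNone sub := by
  induction sub with
  | nil => rfl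
  | cons t ts ih =>
    cases ht : t.2.2 with
    | none => rw [lbSegs_cons_none t ts ht]; simp [segsNone, ht, ih]
    | some h =>
      rw [lbSegs_cons_some t ts h ht]
      show _ = segsNone (t :: ts)
      simp only [segsNone, ht]
      rw [segsFrom_eq ts [(t.1, t.2.1)] h]
      cases hf : firstMk ts with
      | none => simp
      | some kh =>
        have hk : 0 ≤ kh.1 := firstMk_nonneg ts kh hf
        simp [ih, List.take_succ_cons]

-- A's inner fold computes the reference recursion (marker already seen)
theorem foldl_lbStep_some (ts : List (Int × Int × Option Int)) :
    ∀ (l : Int) (cur : List (Int × Int)) (mu : List (Int × Int × List (Int × Int))),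
    (ts.foldl lbStep (some l, cur, mu)).2.2 = mu ++ segsFrom l cur ts := by
  induction ts with
  | nil => intro l cur mu; simp [segsFrom]
  | cons t ts ih =>
    intro l cur mu
    cases ht : t.2.2 with
    | none => simp only [List.foldl_cons, lbStep, ht, segsFrom]; rw [ih]
    | some h => simp only [List.foldl_cons, lbStep, ht, segsFrom]; rw [ih]; simp

-- A's inner fold computes the reference recursion (no marker yet)
theorem foldl_lbStep_none (ts : List (Int × Int × Option Int)) :
    ∀ (cur : List (Int × Int)) (mu : List (Int × Int × List (Int × Int))),
    (ts.foldl lbStep (none, cur, mu)).2.2 = mu ++ segsNone ts := by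
  induction ts with
  | nil => intro cur mu; simp [segsNone]
  | cons t ts ih =>
    intro cur mu
    cases ht : t.2.2 with
    | none => simp only [List.foldl_cons, lbStep, ht, segsNone]; rw [ih]
    | some h => simp only [List.foldl_cons, lbStep, ht, segsNone]; rw [foldl_lbStep_some]

-- A's outer fold
theorem foldl_outer (xs : List (List (Int × Int × Option Int))) :
    ∀ (mu : List (Int × Int × List (Int × Int))),
    xs.foldl (fun mu sub => (sub.foldl lbStep (none, [], mu)).2.2) mu = mu ++ xs.flatMap segsNone := by
  induction xs with
  | nil => intro mu; simp
  | cons sub xs ih =>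
    intro mu
    simp only [List.foldl_cons, List.flatMap_cons]
    rw [ih, foldl_lbStep_none]
    simp

-- ===== VERDICT (by name: the statement is the Claim_ definition above) =====
theorem linebrowser_py_spec : Claim_equal_linebrowser_py := by
  intro xs _
  show linebrowser_py xs = linebrowser_py_alt xs
  unfold linebrowser_py linebrowser_py_alt
  rw [foldl_outer]
  simp only [List.nil_append]
  exact (List.flatMap_congr (fun sub _ => lbSegs_eq_segsNone sub)).symm
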